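-- pv_equiv track=rewrite | github.com/agentidx/agentindex | agentindex/intelligence/machine_analytics.py | is_machine_request
-- ===== SOURCE A (Python) =====
-- MACHINE_UA_PATTERNS = [
--     "chatgpt", "gpt", "openai", "claude", "anthropic", "perplexity",
--     "bingbot", "googlebot", "yandexbot", "baiduspider",
--     "python-requests", "httpx", "aiohttp", "node-fetch", "axios",
--     "curl", "wget", "go-http", "java/", "okhttp",
--     "langchain", "crewai", "autogen", "llama", "huggingface",
--     "mcp-client", "nerq-cli", "NerqTrustCheck",
-- ]
--
-- def is_machine_request(user_agent: str) -> bool: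
--     """Determine if a request is from a machine/AI system."""
--     if not user_agent:
--         return False
--     ua_lower = user_agent.lower()
--     for pattern in MACHINE_UA_PATTERNS:
--         if pattern in ua_lower:
--             return True
--     return False
-- ===== SOURCE B (Python) =====
-- import re
--
-- MACHINE_UA_PATTERNS = [
--     "chatgpt", "gpt", "openai", "claude", "anthropic", "perplexity",
--     "bingbot", "googlebot", "yandexbot", "baiduspider",
--     "python-requests", "httpx", "aiohttp", "node-fetch", "axios",
--     "curl", "wget", "go-http", "java/", "okhttp",
--     "langchain", "crewai", "autogen", "llama", "huggingface",
--     "mcp-client", "nerq-cli", "NerqTrustCheck",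
-- ]
--
-- # Precompiled once at module load: one alternation of escaped literal patterns.
-- # No IGNORECASE: matching is against the lowercased UA, exactly like A's `in` test.
-- _MACHINE_UA_RE = re.compile("|".join(re.escape(p) for p in MACHINE_UA_PATTERNS))
--
-- def is_machine_request(user_agent: str) -> bool:
--     """Determine if a request is from a machine/AI system."""
--     if not user_agent:
--         return False
--     return bool(_MACHINE_UA_RE.search(user_agent.lower()))
-- ===== Notes on version B (the rewrite author's own statement) =====
-- stated objective: idiomatic
-- what changed: Replaces the explicit per-pattern substring loop with a single regex alternation compiled once at module load and scanned in one pass over the lowercased user agent.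
import Mathlib
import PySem

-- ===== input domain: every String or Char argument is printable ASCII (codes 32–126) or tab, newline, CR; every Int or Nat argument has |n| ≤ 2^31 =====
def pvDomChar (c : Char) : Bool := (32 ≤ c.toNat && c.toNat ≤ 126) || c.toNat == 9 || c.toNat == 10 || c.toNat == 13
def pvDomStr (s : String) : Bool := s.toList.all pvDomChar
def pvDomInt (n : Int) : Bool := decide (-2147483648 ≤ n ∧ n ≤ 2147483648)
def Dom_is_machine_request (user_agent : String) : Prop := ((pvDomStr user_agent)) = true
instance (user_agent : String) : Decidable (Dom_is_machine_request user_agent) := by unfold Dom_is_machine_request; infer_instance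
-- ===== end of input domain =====

-- B replaces A's per-pattern substring loop with one precompiled regex alternation
-- (a single left-to-right scan of the lowercased UA); objective: idiomatic.

-- ===== PORT A =====
def MACHINE_UA_PATTERNS : List String := [
    "chatgpt", "gpt", "openai", "claude", "anthropic", "perplexity",
    "bingbot", "googlebot", "yandexbot", "baiduspider",
    "python-requests", "httpx", "aiohttp", "node-fetch", "axios",
    "curl", "wget", "go-http", "java/", "okhttp",
    "langchain", "crewai", "autogen", "llama", "huggingface",
    "mcp-client", "nerq-cli", "NerqTrustCheck"]

-- A's `for pattern in MACHINE_UA_PATTERNS: if pattern in ua_lower: return True`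
def pvLoopA (ps : List String) (uaLower : List Char) : Bool :=
  match ps with
  | [] => false
  | p :: rest => if PySem.Chars.isIn p.toList uaLower then true else pvLoopA rest uaLower

def is_machine_request (user_agent : String) : Bool :=
  if user_agent.toList = [] then false
  else pvLoopA MACHINE_UA_PATTERNS (PySem.Chars.lower user_agent.toList)

-- ===== PORT B =====
-- Model of the compiled alternation `re.compile('|'.join(re.escape(p) for p in ...))`:
-- at one position, does some alternative (a literal pattern) match here?
def pvAltMatchAt (s : List Char) : Bool :=
  MACHINE_UA_PATTERNS.any (fun p => p.toList.isPrefixOf s)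

-- Model of PATTERN.search(s): one left-to-right scan, trying the alternation at each position.
def pvReSearch (s : List Char) : Bool :=
  match s with
  | [] => pvAltMatchAt []
  | _ :: rest => pvAltMatchAt s || pvReSearch rest

def is_machine_request_alt (user_agent : String) : Bool :=
  if user_agent.toList = [] then false
  else pvReSearch (PySem.Chars.lower user_agent.toList)

-- ===== PRECONDITION & SPEC =====
def Spec_is_machine_request (user_agent : String) (out : Bool) : Prop := out = is_machine_request_alt user_agent
instance (user_agent : String) (out : Bool) : Decidable (Spec_is_machine_request user_agent out) := by unfold Spec_is_machine_request; infer_instance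

-- ===== CLAIM (what is proved, stated in full; the proofs are below) =====
def Claim_equal_is_machine_request : Prop := ∀ (user_agent : String), Dom_is_machine_request user_agent → Spec_is_machine_request user_agent (is_machine_request user_agent)

-- ===== LEMMAS AND PROOFS =====

theorem pvLoopA_iff (ps : List String) (s : List Char) :
    pvLoopA ps s = true ↔ ∃ p ∈ ps, PySem.Chars.isIn p.toList s = true := by
  induction ps with
  | nil => simp [pvLoopA]
  | cons p rest ih =>
    simp only [pvLoopA]
    by_cases h : PySem.Chars.isIn p.toList s = true
    · simp [h]
    · simp [h, ih]

theorem pvReSearch_iff (s : List Char) :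
    pvReSearch s = true ↔ ∃ j, pvAltMatchAt (s.drop j) = true := by
  induction s with
  | nil =>
    simp only [pvReSearch]
    constructor
    · intro h; exact ⟨0, h⟩
    · rintro ⟨j, hj⟩; simpa using hj
  | cons c rest ih =>
    simp only [pvReSearch, Bool.or_eq_true, ih]
    constructor
    · rintro (h | ⟨j, hj⟩)
      · exact ⟨0, h⟩
      · exact ⟨j + 1, hj⟩
    · rintro ⟨j, hj⟩
      cases j with
      | zero => exact Or.inl hj
      | succ j => exact Or.inr ⟨j, hj⟩

theorem pvAltMatchAt_iff (s : List Char) :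
    pvAltMatchAt s = true ↔ ∃ p ∈ MACHINE_UA_PATTERNS, p.toList <+: s := by
  simp [pvAltMatchAt, List.any_eq_true, List.isPrefixOf_iff_prefix]

theorem pvSearch_eq_loop (s : List Char) :
    pvReSearch s = pvLoopA MACHINE_UA_PATTERNS s := by
  rcases hb : pvLoopA MACHINE_UA_PATTERNS s with _ | _
  · rw [Bool.eq_false_iff]
    intro hsearch
    rw [pvReSearch_iff] at hsearch
    obtain ⟨j, hj⟩ := hsearch
    rw [pvAltMatchAt_iff] at hj
    obtain ⟨p, hp, hpre⟩ := hj
    have : pvLoopA MACHINE_UA_PATTERNS s = true := by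
      rw [pvLoopA_iff]
      refine ⟨p, hp, ?_⟩
      rw [← PySem.Chars.exists_prefix_drop_iff_isIn]
      exact ⟨j, hpre⟩
    simp [this] at hb
  · rw [pvLoopA_iff] at hb
    obtain ⟨p, hp, hin⟩ := hb
    rw [← PySem.Chars.exists_prefix_drop_iff_isIn] at hin
    obtain ⟨j, hj⟩ := hin
    rw [pvReSearch_iff]
    exact ⟨j, (pvAltMatchAt_iff _).2 ⟨p, hp, hj⟩⟩

-- ===== VERDICT (by name: the statement is the Claim_ definition above) =====
theorem is_machine_request_spec : Claim_equal_is_machine_request := by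
  intro ua _
  unfold Spec_is_machine_request is_machine_request is_machine_request_alt
  split
  · rfl
  · exact (pvSearch_eq_loop _).symm
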